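-- pv_equiv track=rewrite | github.com/ASSERT-KTH/Mokav | experiments/pynguin/c4b/return-lst/generated_tests/src_1739/0/src_1739.py | func
-- ===== SOURCE A (Python) =====
-- def func(*args):
-- 	ret_values = []
--
-- 	a = args[0]
-- 	b = args[1]
-- 	c = args[2]
-- 	a = int(a)
-- 	b = int(b)
-- 	c = int(c)
-- 	ans = 0
-- 	count = 1000
-- 	while (count >= 0):
-- 	    x = int((count / 4))
-- 	    y = int((count / 2))
-- 	    z = int(count)
-- 	    if ((a >= x) and (b >= y) and (c >= z)):
-- 	        ans = ((x + y) + z)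
-- 	        break
-- 	    count -= 4
-- 	ans = int(ans)
-- 	ret_values.append(ans)
--
-- 	return ret_values
-- ===== SOURCE B (Python) =====
-- def func(*args):
--     ret_values = []
--     a = int(args[0])
--     b = int(args[1])
--     c = int(args[2])
--     m = min(4 * a, 2 * b, c, 1000)
--     if m < 0:
--         ans = 0
--     else:
--         count = (m // 4) * 4
--         ans = count // 4 + count // 2 + count
--     ret_values.append(int(ans))
--     return ret_values
-- ===== Notes on version B (the rewrite author's own statement) =====
-- stated objective: simpler
-- what changed: Replaced the 251-step countdown while-loop with a closed form: cap m = min(4a, 2b, c, 1000), round down to a multiple of 4, and compute the answer arithmetically.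
import Mathlib
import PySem

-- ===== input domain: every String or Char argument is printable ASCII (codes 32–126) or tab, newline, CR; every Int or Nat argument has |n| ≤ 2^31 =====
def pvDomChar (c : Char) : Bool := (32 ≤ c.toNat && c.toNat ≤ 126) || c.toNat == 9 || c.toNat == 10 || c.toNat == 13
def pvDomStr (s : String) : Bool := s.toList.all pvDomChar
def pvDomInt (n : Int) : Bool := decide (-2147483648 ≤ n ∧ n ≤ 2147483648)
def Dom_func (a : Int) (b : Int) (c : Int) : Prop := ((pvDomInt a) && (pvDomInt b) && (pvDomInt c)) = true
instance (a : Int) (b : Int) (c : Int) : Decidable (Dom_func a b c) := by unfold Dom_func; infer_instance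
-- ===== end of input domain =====

-- B replaces A's countdown while-loop by a closed-form computation of the largest
-- qualifying multiple of 4 (simpler; return value only, no side effects involved).

-- ===== PORT A =====
-- The while-loop, step for step. Python's `int(count / 4)` / `int(count / 2)` truncate
-- toward zero; the loop body only runs with count ≥ 0 and count ≤ 1000 (float division
-- is exact there), so PySem.Int.floordiv is exact here.
def funcLoopA (a : Int) (b : Int) (c : Int) (count : Int) : Int :=
  if _h : 0 ≤ count then
    let x := PySem.Int.floordiv count 4
    let y := PySem.Int.floordiv count 2
    let z := count
    if a ≥ x ∧ b ≥ y ∧ c ≥ z then (x + y) + z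
    else funcLoopA a b c (count - 4)
  else 0
termination_by (count + 4).toNat
decreasing_by omega

def func (a : Int) (b : Int) (c : Int) : List Int :=
  [funcLoopA a b c 1000]

-- ===== PORT B =====
def func_alt (a : Int) (b : Int) (c : Int) : List Int :=
  let m := min (min (min (4 * a) (2 * b)) c) 1000
  let ans : Int :=
    if m < 0 then 0
    else
      let count := PySem.Int.floordiv m 4 * 4
      PySem.Int.floordiv count 4 + PySem.Int.floordiv count 2 + count
  [ans]

-- ===== PRECONDITION & SPEC =====
def Spec_func (a : Int) (b : Int) (c : Int) (out : List Int) : Prop := out = func_alt a b c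
instance (a : Int) (b : Int) (c : Int) (out : List Int) : Decidable (Spec_func a b c out) := by unfold Spec_func; infer_instance

-- ===== CLAIM (what is proved, stated in full; the proofs are below) =====
def Claim_equal_func : Prop := ∀ (a : Int) (b : Int) (c : Int), Dom_func a b c → Spec_func a b c (func a b c)

-- ===== LEMMAS AND PROOFS =====

-- Characterisation of A's loop at any multiple-of-4 starting count.
theorem funcLoopA_eq (a b c : Int) (k : Nat) :
    funcLoopA a b c (4 * (k : Int)) =
      (if min (min (4 * a) (2 * b)) c < 0 then 0
       else
         (min (4 * (k : Int)) (min (min (4 * a) (2 * b)) c / 4 * 4)) / 4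
           + (min (4 * (k : Int)) (min (min (4 * a) (2 * b)) c / 4 * 4)) / 2
           + min (4 * (k : Int)) (min (min (4 * a) (2 * b)) c / 4 * 4)) := by
  induction k with
  | zero =>
      rw [funcLoopA]
      simp only [PySem.Int.floordiv_eq_ediv_of_pos (by norm_num : (0:Int) < 4),
        PySem.Int.floordiv_eq_ediv_of_pos (by norm_num : (0:Int) < 2)]
      rw [funcLoopA]
      simp only [min_def]
      split_ifs <;> omega
  | succ k ih =>
      rw [funcLoopA]
      simp only [PySem.Int.floordiv_eq_ediv_of_pos (by norm_num : (0:Int) < 4),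
        PySem.Int.floordiv_eq_ediv_of_pos (by norm_num : (0:Int) < 2)]
      have h4 : (4 : Int) * ((k : Int) + 1) - 4 = 4 * (k : Int) := by ring
      push_cast
      rw [h4, ih]
      simp only [min_def]
      split_ifs <;> omega

theorem func_eq_alt (a b c : Int) : func a b c = func_alt a b c := by
  unfold func func_alt
  have h : (1000 : Int) = 4 * ((250 : Nat) : Int) := by norm_num
  rw [h, funcLoopA_eq]
  simp only [PySem.Int.floordiv_eq_ediv_of_pos (by norm_num : (0:Int) < 4),
    PySem.Int.floordiv_eq_ediv_of_pos (by norm_num : (0:Int) < 2)]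
  simp only [min_def]
  norm_num
  split_ifs <;> omega

-- ===== VERDICT (by name: the statement is the Claim_ definition above) =====
theorem func_spec : Claim_equal_func := by
  intro a b c _
  unfold Spec_func
  exact func_eq_alt a b c
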